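-- pv_equiv track=rewrite | github.com/fhlab/TRIAD | ind.py | trim_read
-- ===== SOURCE A (Python) =====
-- def trim_read(ref, read):
--     """
--     In Sanger sequencing the read will likely extend beyond the gene reference. Trim both to reference length.
--     :param ref: MutableSeq for the Sanger read
--     :param read: MutableSeq with the reference sequence
--     :return: trimmed ref & read
--     """
--     start, end = 0, len(ref)
--
--     # trim start
--     for i in range(len(ref)):
--         if ref[i] != '-':
--             start = i
--             break
--     for i in range(len(ref), 1, -1):
--         if ref[i-1] != '-':
--             end = i
--             break
--
--     return ref[start:end], read[start:end]
-- ===== SOURCE B (Python) =====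
-- def trim_read(ref, read):
--     """
--     In Sanger sequencing the read will likely extend beyond the gene reference. Trim both to reference length.
--     One forward pass: collect the indices of non-dash characters of ref; the bounds are
--     the first such index and one past the last (defaulting to the full range).
--     """
--     idx = [i for i, c in enumerate(ref) if c != '-']
--     if idx:
--         start, end = idx[0], idx[-1] + 1
--     else:
--         start, end = 0, len(ref)
--     return ref[start:end], read[start:end]
-- ===== Notes on version B (the rewrite author's own statement) =====
-- stated objective: simpler
-- what changed: Replaces A's two directional break-loops (forward scan for start, descending index scan for end) with a single forward comprehension collecting all non-dash indices, taking first and last+1 as the bounds.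
-- intended difference: When ref has length at least 2, its first character is not a dash and every later character is a dash, A's descending loop range(len(ref),1,-1) never inspects index 0, so A returns ref and read untrimmed, while B trims both up to just after the last non-dash character, which is the intended behaviour; the witness in the Lean file shows both values. — e.g. on trim_read("a-", "xy"): A returns ("a-", "xy"), B returns ("a", "x")
import Mathlib
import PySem

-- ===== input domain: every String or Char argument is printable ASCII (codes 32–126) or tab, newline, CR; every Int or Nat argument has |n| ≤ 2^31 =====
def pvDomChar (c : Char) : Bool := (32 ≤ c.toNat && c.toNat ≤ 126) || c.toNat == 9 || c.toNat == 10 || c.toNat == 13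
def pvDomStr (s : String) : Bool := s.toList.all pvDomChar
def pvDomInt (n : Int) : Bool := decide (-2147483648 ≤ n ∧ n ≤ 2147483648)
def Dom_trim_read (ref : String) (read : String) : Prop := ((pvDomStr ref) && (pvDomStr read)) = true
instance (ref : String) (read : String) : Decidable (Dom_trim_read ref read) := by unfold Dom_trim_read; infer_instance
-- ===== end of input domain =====

-- B replaces A's two directional break-loops by one forward pass collecting the
-- non-dash indices and reading both bounds off that list (objective: simpler).

-- ===== PORT A =====
-- 'for i in range(len(ref)): if ref[i] != '-': start = i; break'
def trimReadStartLoop (ref : String) : List Int → Int → Int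
  | [], start => start
  | i :: rest, start =>
    if PySem.Str.pyGet? ref i ≠ some '-' then i else trimReadStartLoop ref rest start

-- 'for i in range(len(ref), 1, -1): if ref[i-1] != '-': end = i; break'
def trimReadEndLoop (ref : String) : List Int → Int → Int
  | [], e => e
  | i :: rest, e =>
    if PySem.Str.pyGet? ref (i - 1) ≠ some '-' then i else trimReadEndLoop ref rest e

def trim_read (ref : String) (read : String) : String × String :=
  let start : Int := trimReadStartLoop ref (PySem.List.pyRange 0 (PySem.Str.len ref) 1) 0
  let e : Int := trimReadEndLoop ref (PySem.List.pyRange (PySem.Str.len ref) 1 (-1)) (PySem.Str.len ref)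
  (PySem.Str.slice ref (some start) (some e), PySem.Str.slice read (some start) (some e))

-- ===== PORT B =====
-- 'idx = [i for i, c in enumerate(ref) if c != '-']'  (with a generalized start offset for the proofs)
def eIdx (cs : List Char) (a : Int) : List Int :=
  ((PySem.List.enumerate cs a).filter (fun p => p.2 != '-')).map Prod.fst

def trim_read_alt (ref : String) (read : String) : String × String :=
  let idx : List Int := eIdx ref.toList 0
  let se : Int × Int :=
    match idx, idx.getLast? with
    | i :: _, some l => (i, l + 1)
    | _, _ => (0, PySem.Str.len ref)
  (PySem.Str.slice ref (some se.1) (some se.2), PySem.Str.slice read (some se.1) (some se.2))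

-- ===== PRECONDITION & SPEC =====
-- On refs of length ≥ 2 whose only non-dash character is the first one, A's descending
-- loop range(len,1,-1) never inspects index 0, so A returns the pair untrimmed while B
-- trims to the last non-dash character, which is the intended behaviour.
def D_trim_read (ref : String) (read : String) : Prop :=
  2 ≤ ref.toList.length ∧ ref.toList.head? ≠ some '-' ∧
    ref.toList.tail.all (fun c => c == '-') = true
instance (ref : String) (read : String) : Decidable (D_trim_read ref read) := by
  unfold D_trim_read; infer_instance

def Spec_trim_read (ref : String) (read : String) (out : String × String) : Prop :=
  ¬ D_trim_read ref read → out = trim_read_alt ref read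
instance (ref : String) (read : String) (out : String × String) : Decidable (Spec_trim_read ref read out) := by
  unfold Spec_trim_read; infer_instance

def pvDiffWitness_trim_read : String × String := ("a-", "xy")
def pvDiffWitnessOut_trim_read : (String × String) × (String × String) := (("a-", "xy"), ("a", "x"))

-- ===== CLAIM (what is proved, stated in full; the proofs are below) =====
def Claim_unchanged_trim_read : Prop := ∀ (ref : String) (read : String), Dom_trim_read ref read → Spec_trim_read ref read (trim_read ref read)
def Claim_changed_trim_read : Prop := Dom_trim_read (pvDiffWitness_trim_read.1) (pvDiffWitness_trim_read.2) ∧ D_trim_read (pvDiffWitness_trim_read.1) (pvDiffWitness_trim_read.2) ∧ trim_read (pvDiffWitness_trim_read.1) (pvDiffWitness_trim_read.2) = pvDiffWitnessOut_trim_read.1 ∧ trim_read_alt (pvDiffWitness_trim_read.1) (pvDiffWitness_trim_read.2) = pvDiffWitnessOut_trim_read.2 ∧ pvDiffWitnessOut_trim_read.1 ≠ pvDiffWitnessOut_trim_read.2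
def Claim_exact_trim_read : Prop := ∀ (ref : String) (read : String), Dom_trim_read ref read → D_trim_read ref read → trim_read ref read ≠ trim_read_alt ref read

-- ===== LEMMAS AND PROOFS =====

-- last non-dash index of a list, as an option (proof-side helper)
def lastNd : List Char → Option Nat
  | [] => none
  | c :: t =>
    match lastNd t with
    | some k => some (k + 1)
    | none => if c != '-' then some 0 else none

lemma lastNd_concat (xs : List Char) (c : Char) :
    lastNd (xs ++ [c]) = if c != '-' then some xs.length else lastNd xs := by
  induction xs with
  | nil => simp [lastNd]
  | cons x t ih =>
    simp only [List.cons_append, lastNd, ih]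
    by_cases h : c = '-' <;> simp [h]

lemma lastNd_eq_none_iff (t : List Char) :
    lastNd t = none ↔ t.all (fun c => c == '-') = true := by
  induction t with
  | nil => simp [lastNd]
  | cons c t ih =>
    simp only [lastNd, List.all_cons, Bool.and_eq_true, ← ih]
    cases h : lastNd t <;> by_cases hc : c = '-' <;> simp [hc]

lemma lastNd_tail_none (cs : List Char) (h : lastNd cs = none) : lastNd cs.tail = none := by
  cases cs with
  | nil => simpa using h
  | cons c t =>
    simp only [lastNd] at h
    cases hl : lastNd t
    · simpa
    · rw [hl] at h; simp at h

lemma startLoop_eq (ref : String) : ∀ (d a : Nat) (s : Int), ref.toList.length - a = d →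
    trimReadStartLoop ref (PySem.List.pyRange a ref.toList.length 1) s =
      (match (ref.toList.drop a).findIdx? (fun c => c != '-') with
       | some k => ((a + k : Nat) : Int)
       | none => s) := by
  intro d
  induction d with
  | zero =>
    intro a s h
    have ha : ref.toList.length ≤ a := by omega
    rw [PySem.List.pyRange_one_eq_nil (by exact_mod_cast ha), List.drop_eq_nil_of_le ha,
        List.findIdx?_nil]
    rfl
  | succ n ih =>
    intro a s h
    have ha : a < ref.toList.length := by omega
    rw [PySem.List.pyRange_one_cons (by exact_mod_cast ha)]
    have hget : PySem.Str.pyGet? ref (a : Int) = some (ref.toList[a]) := by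
      simp [List.getElem?_eq_getElem ha]
    have hdrop : ref.toList.drop a = ref.toList[a] :: ref.toList.drop (a + 1) :=
      List.drop_eq_getElem_cons ha
    rw [trimReadStartLoop, hget, hdrop, List.findIdx?_cons]
    by_cases hc : ref.toList[a] = '-'
    · rw [if_neg (by simp [hc])]
      have hc' : (ref.toList[a] != '-') = false := by simp [hc]
      rw [hc', if_neg (by simp)]
      have hcast : ((a : Int) + 1) = ((a + 1 : Nat) : Int) := by push_cast; ring
      rw [hcast, ih (a + 1) s (by omega)]
      cases hfi : (ref.toList.drop (a + 1)).findIdx? (fun c => c != '-') with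
      | none => simp
      | some k =>
        simp only [Option.map_some]
        push_cast
        ring_nf
    · rw [if_pos (by simp [hc])]
      simp [hc]

lemma endLoop_eq (ref : String) : ∀ (b : Nat) (e : Int), b ≤ ref.toList.length →
    trimReadEndLoop ref (PySem.List.pyRange b 1 (-1)) e =
      (match lastNd ((ref.toList.take b).tail) with
       | some k => ((k + 2 : Nat) : Int)
       | none => e) := by
  intro b
  induction b using Nat.strong_induction_on with
  | _ b ih =>
    intro e hb
    by_cases h1 : b ≤ 1
    · rw [PySem.List.pyRange_neg_one_eq_nil (by exact_mod_cast h1)]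
      interval_cases b
      · simp [trimReadEndLoop, lastNd]
      · cases h : ref.toList with
        | nil => simp [trimReadEndLoop, lastNd]
        | cons c t => simp [trimReadEndLoop, lastNd]
    · obtain ⟨m, rfl⟩ : ∃ m, b = m + 2 := ⟨b - 2, by omega⟩
      have hlt : m + 1 < ref.toList.length := by omega
      rw [PySem.List.pyRange_neg_one_cons (by exact_mod_cast (by omega : (1:Nat) < m + 2))]
      have hcast : (((m + 2 : Nat) : Int) - 1) = ((m + 1 : Nat) : Int) := by push_cast; ring
      have hget : PySem.Str.pyGet? ref (((m + 2 : Nat) : Int) - 1) = some (ref.toList[m+1]) := by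
        rw [hcast, PySem.Str.pyGet?_natCast]
        exact List.getElem?_eq_getElem hlt
      have hne : ref.toList.take (m + 1) ≠ [] := by
        apply List.ne_nil_of_length_pos
        rw [List.length_take_of_le (by omega)]; omega
      have htake : ref.toList.take (m + 2) = ref.toList.take (m + 1) ++ [ref.toList[m+1]] := by
        rw [List.take_add_one, List.getElem?_eq_getElem hlt]; rfl
      have htail : (ref.toList.take (m + 2)).tail
          = (ref.toList.take (m + 1)).tail ++ [ref.toList[m+1]] := by
        rw [htake, List.tail_append_of_ne_nil hne]
      have hlen : ((ref.toList.take (m + 1)).tail).length = m := by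
        rw [List.length_tail, List.length_take_of_le (by omega)]
        omega
      rw [trimReadEndLoop, hget, htail, lastNd_concat, hlen]
      by_cases hc : ref.toList[m+1] = '-'
      · rw [if_neg (by simp [hc])]
        have hc' : (ref.toList[m+1] != '-') = false := by simp [hc]
        rw [hc', if_neg (by simp)]
        rw [hcast, ih (m + 1) (by omega) e (by omega)]
      · rw [if_pos (by simp [hc])]
        simp [hc]

lemma eIdx_head (cs : List Char) : ∀ a : Int,
    (eIdx cs a).head? = (cs.findIdx? (fun c => c != '-')).map (fun k => a + (k : Int)) := by
  induction cs with
  | nil => intro a; simp [eIdx, PySem.List.enumerate_nil, List.findIdx?_nil]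
  | cons c t ih =>
    intro a
    by_cases hc : c = '-'
    · have hstep : eIdx (c :: t) a = eIdx t (a + 1) := by
        simp [eIdx, PySem.List.enumerate_cons, hc]
      rw [hstep, ih (a + 1), List.findIdx?_cons]
      have hc' : (c != '-') = false := by simp [hc]
      rw [hc', if_neg (by simp)]
      cases t.findIdx? (fun c => c != '-') <;> simp <;> ring
    · have hstep : eIdx (c :: t) a = a :: eIdx t (a + 1) := by
        simp [eIdx, PySem.List.enumerate_cons, hc]
      rw [hstep, List.findIdx?_cons]
      simp [hc]

lemma eIdx_last (cs : List Char) : ∀ a : Int,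
    (eIdx cs a).getLast? = (lastNd cs).map (fun k => a + (k : Int)) := by
  induction cs with
  | nil => intro a; simp [eIdx, PySem.List.enumerate_nil, lastNd]
  | cons c t ih =>
    intro a
    have ht := ih (a + 1)
    by_cases hc : c = '-'
    · have hstep : eIdx (c :: t) a = eIdx t (a + 1) := by
        simp [eIdx, PySem.List.enumerate_cons, hc]
      rw [hstep, ht]
      cases hl : lastNd t with
      | some k => simp [lastNd, hl]; ring
      | none => simp [lastNd, hl, hc]
    · have hstep : eIdx (c :: t) a = a :: eIdx t (a + 1) := by
        simp [eIdx, PySem.List.enumerate_cons, hc]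
      rw [hstep, List.getLast?_cons, ht]
      cases hl : lastNd t with
      | some k =>
        simp [lastNd, hl]
        ring
      | none =>
        simp [lastNd, hl, hc]

-- ===== VERDICT (by name: the statement is the Claim_ definition above) =====
theorem trim_read_spec : Claim_unchanged_trim_read := by
  intro ref read _
  unfold Spec_trim_read
  intro hD
  unfold D_trim_read at hD
  have hlen := PySem.Str.len_eq ref
  have hA1 := startLoop_eq ref (ref.toList.length - 0) 0 0 rfl
  have hA2 := endLoop_eq ref ref.toList.length ((ref.toList.length : Int)) (le_refl _)
  have hH := eIdx_head ref.toList 0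
  have hL := eIdx_last ref.toList 0
  simp only [List.drop_zero, List.take_length, Nat.cast_zero] at hA1 hA2
  cases hfi : ref.toList.findIdx? (fun c => c != '-') with
  | none =>
    have hnil : eIdx ref.toList 0 = [] := by
      simp only [hfi] at hH
      simpa using hH
    have hlnone : lastNd ref.toList = none := by
      cases h : lastNd ref.toList with
      | none => rfl
      | some m => rw [hnil] at hL; simp [h] at hL
    have htl := lastNd_tail_none _ hlnone
    have hA1v : trimReadStartLoop ref (PySem.List.pyRange 0 (PySem.Str.len ref) 1) 0 = 0 := by
      rw [hlen, hA1, hfi]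
    have hA2v : trimReadEndLoop ref (PySem.List.pyRange (PySem.Str.len ref) 1 (-1)) (PySem.Str.len ref)
        = ((ref.toList.length : Int)) := by
      rw [hlen, hA2, htl]
    simp only [trim_read, trim_read_alt]
    rw [hA1v, hA2v, hnil, hlen]
  | some k =>
    have hh : (eIdx ref.toList 0).head? = some ((k : Int)) := by
      rw [hH, hfi]; simp
    obtain ⟨i, rest, hi⟩ : ∃ i rest, eIdx ref.toList 0 = i :: rest := by
      cases h : eIdx ref.toList 0 with
      | nil => rw [h] at hh; simp at hh
      | cons i rest => exact ⟨i, rest, rfl⟩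
    have hik : i = (k : Int) := by rw [hi] at hh; simpa using hh
    have hA1v : trimReadStartLoop ref (PySem.List.pyRange 0 (PySem.Str.len ref) 1) 0 = (k : Int) := by
      rw [hlen, hA1, hfi]; simp
    obtain ⟨c, t, hct⟩ : ∃ c t, ref.toList = c :: t := by
      cases h : ref.toList with
      | nil => rw [h, List.findIdx?_nil] at hfi; simp at hfi
      | cons c t => exact ⟨c, t, rfl⟩
    have htl : ref.toList.tail = t := by rw [hct]; rfl
    have hBv : trim_read_alt ref read
        = (PySem.Str.slice ref (some i) (some (rest.getLast?.getD i + 1)),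
           PySem.Str.slice read (some i) (some (rest.getLast?.getD i + 1))) := by
      simp only [trim_read_alt]
      rw [hi, List.getLast?_cons]
    cases hlt : lastNd t with
    | some k' =>
      have hlcs : lastNd ref.toList = some (k' + 1) := by
        rw [hct]; simp [lastNd, hlt]
      have hgl : (eIdx ref.toList 0).getLast? = some ((k' + 1 : Nat) : Int) := by
        rw [hL, hlcs]; simp
      have hgd : rest.getLast?.getD i = ((k' + 1 : Nat) : Int) := by
        rw [hi, List.getLast?_cons] at hgl; simpa using hgl
      have hA2v : trimReadEndLoop ref (PySem.List.pyRange (PySem.Str.len ref) 1 (-1)) (PySem.Str.len ref)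
          = ((k' + 2 : Nat) : Int) := by
        rw [hlen, hA2, htl, hlt]
      simp only [trim_read]
      rw [hA1v, hA2v, hBv, hgd, hik]
      have hc2 : ((k' + 2 : Nat) : Int) = ((k' + 1 : Nat) : Int) + 1 := by push_cast; ring
      rw [hc2]
    | none =>
      have htall : t.all (fun c => c == '-') = true := (lastNd_eq_none_iff t).mp hlt
      have hcn : c ≠ '-' := by
        intro hc
        have hnone : ref.toList.findIdx? (fun c => c != '-') = none := by
          rw [List.findIdx?_eq_none_iff]
          intro x hx
          rw [hct] at hx
          rcases List.mem_cons.mp hx with h | h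
          · simp [h, hc]
          · have := List.all_eq_true.mp htall x h
            simpa using this
        rw [hnone] at hfi; simp at hfi
      have hlcs : lastNd ref.toList = some 0 := by
        rw [hct]; simp [lastNd, hlt, hcn]
      have hgl : (eIdx ref.toList 0).getLast? = some 0 := by rw [hL, hlcs]; simp
      have hgd : rest.getLast?.getD i = 0 := by
        rw [hi, List.getLast?_cons] at hgl; simpa using hgl
      have hA2v : trimReadEndLoop ref (PySem.List.pyRange (PySem.Str.len ref) 1 (-1)) (PySem.Str.len ref)
          = ((ref.toList.length : Int)) := by
        rw [hlen, hA2, htl, hlt]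
      have hk0 : k = 0 := by
        rw [hct, List.findIdx?_cons, if_pos (by simp [hcn])] at hfi
        simpa using hfi.symm
      have hlen1 : ref.toList.length = 1 := by
        by_contra h
        have h2 : 2 ≤ ref.toList.length := by
          rw [hct] at h ⊢
          simp only [List.length_cons] at h ⊢
          omega
        exact hD ⟨h2, by rw [hct]; simp [hcn], by rw [htl]; exact htall⟩
      simp only [trim_read]
      rw [hA1v, hA2v, hBv, hgd, hik, hk0, hlen1]
      norm_num
theorem trim_read_changed : Claim_changed_trim_read := by unfold Claim_changed_trim_read; decide
theorem trim_read_tight : Claim_exact_trim_read := by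
  intro ref read _ hD
  obtain ⟨h2, hh, hall⟩ := hD
  obtain ⟨c, t, hct⟩ : ∃ c t, ref.toList = c :: t := by
    cases h : ref.toList with
    | nil => rw [h] at h2; simp at h2
    | cons c t => exact ⟨c, t, rfl⟩
  have hcn : c ≠ '-' := by rw [hct] at hh; simpa using hh
  have htall : t.all (fun c => c == '-') = true := by rw [hct] at hall; simpa using hall
  have hlt : lastNd t = none := (lastNd_eq_none_iff t).mpr htall
  have hlen := PySem.Str.len_eq ref
  have hfi : ref.toList.findIdx? (fun c => c != '-') = some 0 := by
    rw [hct, List.findIdx?_cons, if_pos (by simp [hcn])]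
  have hA1 := startLoop_eq ref (ref.toList.length - 0) 0 0 rfl
  have hA2 := endLoop_eq ref ref.toList.length ((ref.toList.length : Int)) (le_refl _)
  simp only [List.drop_zero, List.take_length, Nat.cast_zero] at hA1 hA2
  have htl : ref.toList.tail = t := by rw [hct]; rfl
  have hA1v : trimReadStartLoop ref (PySem.List.pyRange 0 (PySem.Str.len ref) 1) 0 = 0 := by
    rw [hlen, hA1, hfi]; simp
  have hA2v : trimReadEndLoop ref (PySem.List.pyRange (PySem.Str.len ref) 1 (-1)) (PySem.Str.len ref)
      = ((ref.toList.length : Int)) := by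
    rw [hlen, hA2, htl, hlt]
  have hlcs : lastNd ref.toList = some 0 := by rw [hct]; simp [lastNd, hlt, hcn]
  have hH := eIdx_head ref.toList 0
  have hL := eIdx_last ref.toList 0
  rw [hfi] at hH; rw [hlcs] at hL
  obtain ⟨rest, hi⟩ : ∃ rest, eIdx ref.toList 0 = 0 :: rest := by
    cases h : eIdx ref.toList 0 with
    | nil => rw [h] at hH; simp at hH
    | cons i rest =>
      rw [h] at hH
      simp at hH
      exact ⟨rest, by rw [← hH]⟩
  have hgl : (eIdx ref.toList 0).getLast? = some 0 := by
    rw [hi, List.getLast?_cons] at hL ⊢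
    simpa using hL
  have hgd : rest.getLast?.getD (0 : Int) = 0 := by
    rw [hi, List.getLast?_cons] at hgl
    simpa using hgl
  have hBv : trim_read_alt ref read
      = (PySem.Str.slice ref (some 0) (some 1), PySem.Str.slice read (some 0) (some 1)) := by
    simp only [trim_read_alt]
    rw [hi, List.getLast?_cons, hgd]
    norm_num
  have hAv : trim_read ref read
      = (PySem.Str.slice ref (some 0) (some ((ref.toList.length : Int))),
         PySem.Str.slice read (some 0) (some ((ref.toList.length : Int)))) := by
    simp only [trim_read]
    rw [hA1v, hA2v]
  rw [hAv, hBv]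
  intro heq
  have h1 := congrArg (fun p => p.1.toList.length) heq
  simp only at h1
  have hA1' : (PySem.Str.slice ref (some 0) (some ((ref.toList.length : Int)))).toList
      = ref.toList := by
    simp [PySem.Str.slice, PySem.List.slice_to_natCast]
  have hsl : PySem.List.slice ref.toList none (some (1 : Int)) = ref.toList.take ((1 : Int).toNat) := by
    first
      | exact PySem.List.slice_to (by norm_num)
      | exact PySem.List.slice_to _ (by norm_num)
  have hB1' : (PySem.Str.slice ref (some 0) (some 1)).toList = ref.toList.take 1 := by
    simp [PySem.Str.slice, hsl]
  rw [hA1', hB1'] at h1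
  rw [List.length_take_of_le (by rw [hct]; simp)] at h1
  omega
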